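-- pv_equiv track=rewrite | github.com/block-open-source/goose | src/goose/toolkit/utils.py | find_last_task_group_index
-- ===== SOURCE A (Python) =====
-- def find_last_task_group_index(input_str: str) -> int:
--     lines = input_str.splitlines()
--     last_group_start_index = -1
--     current_group_start_index = -1
--
--     for i, line in enumerate(lines):
--         line = line.strip()
--         if line.startswith("-"):
--             # If this is the first line of a new group, mark its start
--             if current_group_start_index == -1:
--                 current_group_start_index = i
--         else:
--             # If we encounter a non-hyphenated line and had a group, update last group start
--             if current_group_start_index != -1:
--                 last_group_start_index = current_group_start_index
--                 current_group_start_index = -1  # Reset for potential future groups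
--
--     # If the input ended in a task group, update the last group index
--     if current_group_start_index != -1:
--         last_group_start_index = current_group_start_index
--     return last_group_start_index
-- ===== SOURCE B (Python) =====
-- def find_last_task_group_index(input_str: str) -> int:
--     lines = input_str.splitlines()
--     is_task = [line.strip().startswith("-") for line in lines]
--     j = len(lines) - 1
--     while j >= 0 and not is_task[j]:
--         j -= 1
--     if j < 0:
--         return -1
--     while j > 0 and is_task[j - 1]:
--         j -= 1
--     return j
-- ===== Notes on version B (the rewrite author's own statement) =====
-- stated objective: alternative
-- what changed: Replaces A's forward pass that tracks current/last group-start state with a backward scan: precompute per-line hyphen flags, find the last flagged line from the end, then extend the run downward to its start.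
import Mathlib
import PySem

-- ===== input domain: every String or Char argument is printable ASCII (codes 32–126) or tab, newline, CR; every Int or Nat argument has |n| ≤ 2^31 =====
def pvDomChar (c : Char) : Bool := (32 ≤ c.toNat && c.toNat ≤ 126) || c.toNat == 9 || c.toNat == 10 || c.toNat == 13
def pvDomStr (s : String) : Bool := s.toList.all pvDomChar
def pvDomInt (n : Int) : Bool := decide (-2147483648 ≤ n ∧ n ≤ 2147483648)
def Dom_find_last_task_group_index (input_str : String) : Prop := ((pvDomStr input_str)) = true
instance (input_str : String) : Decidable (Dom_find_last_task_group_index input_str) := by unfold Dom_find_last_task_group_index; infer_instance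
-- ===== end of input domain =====

-- B replaces A's forward single pass tracking current/last group starts by a backward
-- find-then-extend scan over precomputed per-line flags (objective: alternative decomposition; same cost).

-- ===== PORT A =====
def find_last_task_group_index (input_str : String) : Int :=
  let lines := PySem.Str.splitlines input_str
  let s := (PySem.List.enumerate lines).foldl
    (fun (s : Int × Int) (il : Int × String) =>
      let line := PySem.Str.strip il.2
      if PySem.Str.startswith line "-" then
        (s.1, if s.2 = -1 then il.1 else s.2)
      else
        if s.2 ≠ -1 then (s.2, -1) else (s.1, -1))
    (-1, -1)
  if s.2 ≠ -1 then s.2 else s.1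

-- ===== PORT B =====
def pvIsTask (line : String) : Bool :=
  PySem.Str.startswith (PySem.Str.strip line) "-"

-- Source B's first while loop: from j walk down while the flag is False; none = fell below 0
def pvFindDown (flags : List Bool) : Nat → Option Nat
  | 0 => if flags.getD 0 false then some 0 else none
  | j+1 => if flags.getD (j+1) false then some (j+1) else pvFindDown flags j

-- Source B's second while loop: from j walk down while the preceding flag is True
def pvExtendDown (flags : List Bool) : Nat → Nat
  | 0 => 0
  | j+1 => if flags.getD j false then pvExtendDown flags j else j+1

def find_last_task_group_index_alt (input_str : String) : Int :=
  let lines := PySem.Str.splitlines input_str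
  let flags := lines.map pvIsTask
  match flags with
  | [] => -1                                   -- j = len-1 < 0: first loop does not run, return -1
  | _ :: _ =>
    match pvFindDown flags (flags.length - 1) with
    | none => -1
    | some j => ((pvExtendDown flags j : Nat) : Int)

-- ===== PRECONDITION & SPEC =====
def Spec_find_last_task_group_index (input_str : String) (out : Int) : Prop := out = find_last_task_group_index_alt input_str
instance (input_str : String) (out : Int) : Decidable (Spec_find_last_task_group_index input_str out) := by unfold Spec_find_last_task_group_index; infer_instance

-- ===== CLAIM (what is proved, stated in full; the proofs are below) =====
def Claim_equal_find_last_task_group_index : Prop := ∀ (input_str : String), Dom_find_last_task_group_index input_str → Spec_find_last_task_group_index input_str (find_last_task_group_index input_str)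

-- ===== LEMMAS AND PROOFS =====

-- A's loop body, abstracted to the per-line flag
def pvStepF (s : Int × Int) (ib : Int × Bool) : Int × Int :=
  if ib.2 then (s.1, if s.2 = -1 then ib.1 else s.2)
  else if s.2 ≠ -1 then (s.2, -1) else (s.1, -1)

def pvFoldF (flags : List Bool) : Int × Int :=
  (PySem.List.enumerate flags).foldl pvStepF (-1, -1)

def pvResA (flags : List Bool) : Int :=
  let s := pvFoldF flags
  if s.2 ≠ -1 then s.2 else s.1

def pvResB (flags : List Bool) : Int :=
  match flags with
  | [] => -1
  | _ :: _ =>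
    match pvFindDown flags (flags.length - 1) with
    | none => -1
    | some j => ((pvExtendDown flags j : Nat) : Int)

theorem pvA_eq_resA (input_str : String) :
    find_last_task_group_index input_str
      = pvResA ((PySem.Str.splitlines input_str).map pvIsTask) := by
  have h : ∀ (xs : List String) (n : Int) (s : Int × Int),
      (PySem.List.enumerate xs n).foldl
        (fun (s : Int × Int) (il : Int × String) =>
          let line := PySem.Str.strip il.2
          if PySem.Str.startswith line "-" then
            (s.1, if s.2 = -1 then il.1 else s.2)
          else
            if s.2 ≠ -1 then (s.2, -1) else (s.1, -1)) s
        = (PySem.List.enumerate (xs.map pvIsTask) n).foldl pvStepF s := by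
    intro xs
    induction xs with
    | nil => intro n s; simp [PySem.List.enumerate_nil]
    | cons x xs ih =>
      intro n s
      simp only [List.map_cons, PySem.List.enumerate_cons, List.foldl_cons, ih]
      rfl
  simp only [find_last_task_group_index, pvResA, pvFoldF, h]

theorem pvB_eq_resB (input_str : String) :
    find_last_task_group_index_alt input_str
      = pvResB ((PySem.Str.splitlines input_str).map pvIsTask) := rfl

theorem pvFindDown_append (flags ys : List Bool) :
    ∀ j, j < flags.length → pvFindDown (flags ++ ys) j = pvFindDown flags j := by
  intro j
  induction j with
  | zero => intro hj; simp [pvFindDown, List.getElem?_append_left hj]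
  | succ j ih =>
      intro hj
      simp [pvFindDown, List.getElem?_append_left hj, ih (by omega)]

theorem pvExtendDown_append (flags ys : List Bool) :
    ∀ j, j ≤ flags.length → pvExtendDown (flags ++ ys) j = pvExtendDown flags j := by
  intro j
  induction j with
  | zero => intro _; simp [pvExtendDown]
  | succ j ih =>
      intro hj
      simp [pvExtendDown, List.getElem?_append_left (by omega : j < flags.length), ih (by omega)]

theorem pvFindDown_le (flags : List Bool) :
    ∀ n j, pvFindDown flags n = some j → j ≤ n := by
  intro n
  induction n with
  | zero =>
      intro j h
      simp only [pvFindDown] at h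
      split at h <;> simp_all
  | succ n ih =>
      intro j h
      simp only [pvFindDown] at h
      split at h
      · simp_all
      · exact le_trans (ih j h) (by omega)

theorem pvResB_of_ne_nil (l : List Bool) (h : l ≠ []) :
    pvResB l = (match pvFindDown l (l.length - 1) with
      | none => -1
      | some j => ((pvExtendDown l j : Nat) : Int)) := by
  cases l with
  | nil => exact absurd rfl h
  | cons a as => rfl

theorem pvMain (flags : List Bool) :
    ((pvFoldF flags).2 = match flags.getLast? with
        | some true => ((pvExtendDown flags (flags.length - 1) : Nat) : Int)
        | _ => -1)
    ∧ pvResA flags = pvResB flags := by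
  induction flags using List.reverseRecOn with
  | nil => constructor <;> simp [pvFoldF, pvResA, pvResB, PySem.List.enumerate_nil]
  | append_singleton flags b ih =>
    obtain ⟨ih1, ih2⟩ := ih
    have hfold : pvFoldF (flags ++ [b]) = pvStepF (pvFoldF flags) ((flags.length : Int), b) := by
      simp [pvFoldF, PySem.List.enumerate_append, PySem.List.enumerate_cons,
        PySem.List.enumerate_nil]
    have hlast : (flags ++ [b]).getLast? = some b := by simp
    have hlen : (flags ++ [b]).length - 1 = flags.length := by simp
    have hnil : flags ++ [b] ≠ [] := by simp
    cases b with
    | true =>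
      -- new cur = if cur = -1 then len else cur, and it equals extendDown from len
      have hcur : (pvFoldF (flags ++ [true])).2
          = ((pvExtendDown (flags ++ [true]) flags.length : Nat) : Int) := by
        rw [hfold]
        rcases hl : flags.length with _ | m
        · have hflags : flags = [] := List.eq_nil_iff_length_eq_zero.mpr hl
          subst hflags
          simp [pvFoldF, PySem.List.enumerate_nil, pvStepF, pvExtendDown]
        · have hm : m < flags.length := by omega
          have hgl : flags.getLast? = some (flags[m]'hm) := by
            rw [List.getLast?_eq_getElem?]
            simp [hl]
          have hext : pvExtendDown (flags ++ [true]) (m + 1)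
              = if flags[m]'hm = true then pvExtendDown (flags ++ [true]) m else m + 1 := by
            simp [pvExtendDown, List.getElem?_append_left hm, List.getElem?_eq_getElem hm]
          rcases hb : flags[m]'hm with _ | _
          · -- last flag of the prefix is false: cur = -1, new cur = len
            have hc : (pvFoldF flags).2 = -1 := by rw [ih1, hgl, hb]
            rw [hext, hb]
            simp [pvStepF, hc]
          · -- last flag of the prefix is true: cur = extendDown flags m, a Nat
            have hc : (pvFoldF flags).2 = ((pvExtendDown flags m : Nat) : Int) := by
              rw [ih1, hgl, hb]; simp [hl]
            have hcne : (pvFoldF flags).2 ≠ -1 := by rw [hc]; omega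
            rw [hext, hb]
            simp only [pvStepF, if_true]
            simp [hc, pvExtendDown_append flags [true] m (by omega)]
      have hfind : pvFindDown (flags ++ [true]) flags.length = some flags.length := by
        rcases hl : flags.length with _ | m
        · have hflags : flags = [] := List.eq_nil_iff_length_eq_zero.mpr hl
          subst hflags; simp [pvFindDown]
        · have hget : (flags ++ [true])[m + 1]? = some true := by
            rw [← hl]; exact List.getElem?_concat_length
          simp [pvFindDown, hget]
      constructor
      · rw [hlast, hlen]; exact hcur
      · have hne2 : (pvFoldF (flags ++ [true])).2 ≠ -1 := by rw [hcur]; omega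
        rw [pvResB_of_ne_nil _ hnil, hlen, hfind]
        simp only [pvResA, if_pos hne2]
        exact hcur
    | false =>
      have hc2 : (pvFoldF (flags ++ [false])).2 = -1 := by
        rw [hfold]
        simp only [pvStepF]
        norm_num
        split <;> rfl
      constructor
      · rw [hlast]; exact hc2
      · have hresA : pvResA (flags ++ [false]) = pvResA flags := by
          simp only [pvResA, hfold]
          simp only [pvStepF]
          norm_num
          by_cases h : (pvFoldF flags).2 = -1
          · simp [h]
          · simp [h]
        have hresB : pvResB (flags ++ [false]) = pvResB flags := by
          rcases hl : flags.length with _ | m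
          · have hflags : flags = [] := List.eq_nil_iff_length_eq_zero.mpr hl
            subst hflags
            simp [pvResB, pvFindDown]
          · have hne : flags ≠ [] := by intro h; subst h; simp at hl
            have hget : (flags ++ [false])[m + 1]? = some false := by
              rw [← hl]; exact List.getElem?_concat_length
            have hstep : pvFindDown (flags ++ [false]) (m + 1) = pvFindDown flags m := by
              simp [pvFindDown, hget, pvFindDown_append flags [false] m (by omega)]
            rw [pvResB_of_ne_nil _ hnil, pvResB_of_ne_nil _ hne, hlen, hl, hstep]
            simp only [Nat.add_sub_cancel]
            rcases hfd : pvFindDown flags m with _ | j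
            · rfl
            · have hj : j ≤ m := pvFindDown_le flags m j hfd
              simp [pvExtendDown_append flags [false] j (by omega)]
        rw [hresA, hresB, ih2]

-- ===== VERDICT (by name: the statement is the Claim_ definition above) =====
theorem find_last_task_group_index_spec : Claim_equal_find_last_task_group_index := by
  intro input_str _
  unfold Spec_find_last_task_group_index
  rw [pvA_eq_resA, pvB_eq_resB]
  exact (pvMain _).2
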